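-- pv_equiv track=rewrite | github.com/mgedmin/zcml-tool | zcml.py | resolve_package
-- ===== SOURCE A (Python) =====
-- def resolve_package(package, relative_to):
--     if not package:
--         return relative_to
--     if not package.startswith('.'):
--         return package
--     while package.startswith('..'):
--         package = package[1:]
--         relative_to = relative_to.rpartition('.')[0]
--     return relative_to + package
-- ===== SOURCE B (Python) =====
-- def resolve_package(package, relative_to):
--     if not package:
--         return relative_to
--     if not package.startswith('.'):
--         return package
--     dots = len(package) - len(package.lstrip('.'))
--     parts = relative_to.split('.')
--     keep = max(0, len(parts) - (dots - 1))
--     return '.'.join(parts[:keep]) + package[dots - 1:]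
-- ===== Notes on version B (the rewrite author's own statement) =====
-- stated objective: simpler
-- what changed: A strips one leading dot at a time, calling rpartition on relative_to in each loop iteration; B counts the leading dots once, splits relative_to on '.' once, and returns '.'.join of the kept components plus the package tail in a single slice.
import Mathlib
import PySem

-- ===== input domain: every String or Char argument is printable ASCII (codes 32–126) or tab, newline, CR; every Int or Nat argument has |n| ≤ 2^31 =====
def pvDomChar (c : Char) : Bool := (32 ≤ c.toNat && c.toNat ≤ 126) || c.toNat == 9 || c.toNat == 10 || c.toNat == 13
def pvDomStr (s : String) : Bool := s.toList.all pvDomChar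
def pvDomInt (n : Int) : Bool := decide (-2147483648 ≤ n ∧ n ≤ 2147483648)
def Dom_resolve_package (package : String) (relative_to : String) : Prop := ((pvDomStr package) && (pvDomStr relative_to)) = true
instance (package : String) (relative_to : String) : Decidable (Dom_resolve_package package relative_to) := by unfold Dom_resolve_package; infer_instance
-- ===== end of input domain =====

-- B replaces A's repeated-rpartition while loop by a single count of the leading dots plus one
-- split/slice/join over relative_to's component list (objective: simpler; same return value).

-- ===== PORT A =====
-- hand port of `s.rpartition('.')[0]` (no PySem primitive): the text before the LAST '.', '' when '.' is absent — exact
def rpartBefore (s : List Char) : List Char :=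
  ((s.reverse.dropWhile (· != '.')).tail).reverse

-- A's `while package.startswith('..')` loop: strip one leading dot, drop relative_to's last component
def resolveLoop (pkg rel : List Char) : List Char :=
  match pkg, rel with
  | '.' :: '.' :: rest, rel => resolveLoop ('.' :: rest) (rpartBefore rel)
  | pkg, rel => rel ++ pkg
termination_by pkg.length
decreasing_by simp

def resolve_package (package : String) (relative_to : String) : String :=
  if package.toList = [] then relative_to
  else if !PySem.Chars.startswith package.toList ['.'] then package
  else String.ofList (resolveLoop package.toList relative_to.toList)

-- ===== PORT B =====
def resolve_package_alt (package : String) (relative_to : String) : String :=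
  if package.toList = [] then relative_to
  else if !PySem.Chars.startswith package.toList ['.'] then package
  else
    let p := package.toList
    -- dots = len(package) - len(package.lstrip('.')); lstrip('.') ported by hand as dropWhile (exact)
    let dots : Int := (p.length : Int) - ((p.dropWhile (· == '.')).length : Int)
    let parts := PySem.Chars.splitOn relative_to.toList ['.']
    let keep : Int := max 0 ((parts.length : Int) - (dots - 1))
    String.ofList (PySem.Chars.join ['.'] (PySem.List.slice parts none (some keep)) ++
               PySem.List.slice p (some (dots - 1)) none)

-- ===== PRECONDITION & SPEC =====
def Spec_resolve_package (package : String) (relative_to : String) (out : String) : Prop := out = resolve_package_alt package relative_to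
instance (package : String) (relative_to : String) (out : String) : Decidable (Spec_resolve_package package relative_to out) := by unfold Spec_resolve_package; infer_instance

-- ===== CLAIM (what is proved, stated in full; the proofs are below) =====
def Claim_equal_resolve_package : Prop := ∀ (package : String) (relative_to : String), Dom_resolve_package package relative_to → Spec_resolve_package package relative_to (resolve_package package relative_to)

-- ===== LEMMAS AND PROOFS =====

-- structural single-character split on '.', used only by the proofs
def splitDot (pre : List Char) : List Char → List (List Char)
  | [] => [pre]
  | c :: rest => if c = '.' then pre :: splitDot [] rest else splitDot (pre ++ [c]) rest

lemma go_eq_splitDot (fuel : Nat) : ∀ (s : List Char) (cur : List Char) (acc : List (List Char)),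
    s.length < fuel →
    PySem.Chars.splitOn.go ['.'] fuel s cur acc = acc.reverse ++ splitDot cur.reverse s := by
  induction fuel with
  | zero => intro s cur acc h; omega
  | succ f ih =>
    intro s cur acc h
    match s with
    | [] => simp [PySem.Chars.splitOn.go, splitDot]
    | c :: rest =>
      rw [PySem.Chars.splitOn.go]
      simp only [List.isPrefixOf, Bool.and_true, List.length_cons,
        List.length_nil, Nat.zero_add, List.drop_succ_cons, List.drop_zero]
      by_cases hc : c = '.'
      · subst hc
        rw [if_pos (by simp)]
        rw [ih rest [] (cur.reverse :: acc) (by simp at h ⊢; omega)]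
        simp [splitDot]
      · rw [if_neg (by simpa using fun hh => hc (by simpa using hh.symm))]
        rw [ih rest (c :: cur) acc (by simp at h ⊢; omega)]
        simp [splitDot, hc]

lemma splitOn_eq_splitDot (s : List Char) :
    PySem.Chars.splitOn s ['.'] = splitDot [] s := by
  show PySem.Chars.splitOn.go ['.'] (s.length + 1) s [] [] = _
  rw [go_eq_splitDot (s.length + 1) s [] [] (by omega)]
  simp

lemma splitDot_ne_nil (pre s : List Char) : splitDot pre s ≠ [] := by
  induction s generalizing pre with
  | nil => simp [splitDot]
  | cons c rest ih => by_cases hc : c = '.' <;> simp [splitDot, hc, ih]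

lemma join_splitDot (pre s : List Char) :
    PySem.Chars.join ['.'] (splitDot pre s) = pre ++ s := by
  induction s generalizing pre with
  | nil => simp [splitDot, PySem.Chars.join_singleton]
  | cons c rest ih =>
    by_cases hc : c = '.'
    · subst hc
      rw [splitDot]
      rw [if_pos rfl]
      obtain ⟨q, t, hqt⟩ : ∃ q t, splitDot ([] : List Char) rest = q :: t := by
        cases h : splitDot ([] : List Char) rest with
        | nil => exact absurd h (splitDot_ne_nil _ _)
        | cons q t => exact ⟨q, t, rfl⟩
      rw [hqt, PySem.Chars.join_cons_cons, ← hqt, ih]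
      simp
    · rw [splitDot, if_neg hc, ih]
      simp

lemma splitDot_dotfree (pre s : List Char) (h : '.' ∉ pre) :
    ∀ x ∈ splitDot pre s, '.' ∉ x := by
  induction s generalizing pre with
  | nil => simpa [splitDot] using h
  | cons c rest ih =>
    by_cases hc : c = '.'
    · subst hc
      rw [splitDot, if_pos rfl]
      intro x hx
      rcases List.mem_cons.1 hx with rfl | hx
      · exact h
      · exact ih [] (by simp) x hx
    · rw [splitDot, if_neg hc]
      exact ih (pre ++ [c]) (by simp [h]; exact fun hh => hc hh.symm) 

lemma join_append_last (sep : List Char) (l : List (List Char)) (x : List Char) (h : l ≠ []) :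
    PySem.Chars.join sep (l ++ [x]) = PySem.Chars.join sep l ++ sep ++ x := by
  induction l with
  | nil => simp at h
  | cons q t ih =>
    cases t with
    | nil => simp [PySem.Chars.join_cons_cons, PySem.Chars.join_singleton]
    | cons q2 t2 =>
      simp only [List.cons_append]
      rw [PySem.Chars.join_cons_cons, ← List.cons_append, ih (by simp), PySem.Chars.join_cons_cons]
      simp

lemma rpart_join (parts : List (List Char)) (h : ∀ x ∈ parts, '.' ∉ x) :
    rpartBefore (PySem.Chars.join ['.'] parts) = PySem.Chars.join ['.'] parts.dropLast := by
  rcases List.eq_nil_or_concat parts with rfl | ⟨l, x, rfl⟩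
  · simp [rpartBefore, PySem.Chars.join_nil]
  · simp only [List.concat_eq_append] at h ⊢
    have hx : '.' ∉ x := h x (by simp)
    rcases List.eq_nil_or_concat' l with rfl | ⟨_, _, _⟩
    · -- singleton
      rw [List.nil_append, PySem.Chars.join_singleton]
      rw [rpartBefore]
      rw [List.dropWhile_eq_nil_iff.2 (by intro c hc; simp; intro hceq; subst hceq; exact absurd (List.mem_reverse.1 hc) hx)]
      simp [PySem.Chars.join_nil]
    · have hl : l ≠ [] := by rename_i a b hb; subst hb; simp
      rw [join_append_last _ _ _ hl, rpartBefore]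
      have : (PySem.Chars.join ['.'] l ++ ['.'] ++ x).reverse = x.reverse ++ '.' :: (PySem.Chars.join ['.'] l).reverse := by simp
      rw [this, List.dropWhile_append]
      rw [List.dropWhile_eq_nil_iff.2 (by intro c hc; simp; intro hceq; subst hceq; exact absurd (List.mem_reverse.1 hc) hx)]
      simp

lemma resolveLoop_dd (rest rel : List Char) :
    resolveLoop ('.' :: '.' :: rest) rel = resolveLoop ('.' :: rest) (rpartBefore rel) := by
  rw [resolveLoop.eq_def]
  rfl

lemma resolveLoop_stop (pkg rel : List Char) (h : pkg.head? = some '.' → pkg.tail.head? ≠ some '.') :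
    resolveLoop pkg rel = rel ++ pkg := by
  rw [resolveLoop.eq_def]
  split
  · simp_all
  · rfl

lemma resolveLoop_main (d : Nat) : ∀ (rest : List Char) (parts : List (List Char)),
    1 ≤ d → rest.head? ≠ some '.' → (∀ x ∈ parts, '.' ∉ x) →
    resolveLoop (List.replicate d '.' ++ rest) (PySem.Chars.join ['.'] parts)
      = PySem.Chars.join ['.'] (parts.take (parts.length - (d - 1))) ++ '.' :: rest := by
  induction d with
  | zero => intro _ _ h; omega
  | succ n ih =>
    intro rest parts _ hr hp
    rcases Nat.eq_zero_or_pos n with rfl | hn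
    · -- d = 1
      rw [List.replicate_one, List.singleton_append,
        resolveLoop_stop ('.' :: rest) _ (by intro _; simpa using hr)]
      simp
    · -- d = n + 1, n >= 1
      have hrep : List.replicate (n + 1) '.' ++ rest
          = '.' :: '.' :: (List.replicate (n - 1) '.' ++ rest) := by
        have : n = (n - 1) + 1 := by omega
        rw [List.replicate_succ, this, List.replicate_succ]
        simp
      rw [hrep, resolveLoop_dd, rpart_join parts hp]
      have hrep2 : '.' :: (List.replicate (n - 1) '.' ++ rest)
          = List.replicate n '.' ++ rest := by
        have : n = (n - 1) + 1 := by omega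
        rw [this, List.replicate_succ]
        simp
      rw [hrep2, ih rest parts.dropLast hn hr (fun x hx => hp x (List.dropLast_subset _ hx))]
      congr 2
      rw [List.dropLast_eq_take, List.take_take, List.length_take]
      congr 1
      omega

-- ===== VERDICT (by name: the statement is the Claim_ definition above) =====
theorem resolve_package_spec : Claim_equal_resolve_package := by
  intro package relative_to _
  unfold Spec_resolve_package resolve_package resolve_package_alt
  split
  · rfl
  · split
    · rfl
    · rename_i hne hsw
      rw [Bool.not_eq_true', Bool.not_eq_false] at hsw
      rw [PySem.Chars.startswith_iff] at hsw
      dsimp only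
      set p := package.toList with hp
      set d := (p.takeWhile (· == '.')).length with hd
      set rest := p.dropWhile (· == '.') with hrest
      have hhead : p.head? = some '.' := by
        rcases hsw with ⟨t, ht⟩
        rw [← ht]
        rfl
      have h1 : p = List.replicate d '.' ++ rest := by
        conv_lhs => rw [← List.takeWhile_append_dropWhile (p := (· == '.')) (l := p)]
        congr 1
        exact List.eq_replicate_iff.2 ⟨rfl, fun b hb => by
          have := List.mem_takeWhile_imp hb; simpa using this⟩
      have h2 : 1 ≤ d := by
        cases hpc : p with
        | nil => simp [hpc] at hhead
        | cons c t =>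
          have hc : c = '.' := by simp [hpc] at hhead; exact hhead
          rw [hd, hpc, List.takeWhile_cons, if_pos (by simp [hc])]
          simp
      have h3 : rest.head? ≠ some '.' := by
        intro hcon
        have hne2 : rest ≠ [] := by
          intro hnil
          rw [hnil] at hcon
          simp at hcon
        have hfalse : (rest.head hne2 == '.') = false :=
          List.head_dropWhile_not (· == '.') hne2
        rw [List.head?_eq_some_head hne2] at hcon
        have : rest.head hne2 = '.' := by simpa using hcon
        simp [this] at hfalse
      have hlen : p.length = d + rest.length := by
        conv_lhs => rw [h1]
        simp
      have hdots : ((p.length : Int) - ((p.dropWhile (· == '.')).length : Int)) = (d : Int) := by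
        rw [← hrest]
        omega
      rw [hdots]
      have hdropP : PySem.List.slice p (some ((d : Int) - 1)) none = '.' :: rest := by
        rw [PySem.List.slice_from p (by omega)]
        have : ((d : Int) - 1).toNat = d - 1 := by omega
        rw [this]
        conv_lhs => rw [h1]
        rw [List.drop_append_of_le_length (by simp), List.drop_replicate]
        have : d - (d - 1) = 1 := by omega
        rw [this]
        rfl
      rw [hdropP]
      set parts := PySem.Chars.splitOn relative_to.toList ['.'] with hparts
      have hkeep : PySem.List.slice parts none (some (max 0 ((parts.length : Int) - ((d : Int) - 1))))
          = parts.take (parts.length - (d - 1)) := by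
        rw [PySem.List.slice_to parts (le_max_left _ _)]
        congr 1
        omega
      rw [hkeep, hparts, splitOn_eq_splitDot]
      have hrel : relative_to.toList = PySem.Chars.join ['.'] (splitDot [] relative_to.toList) := by
        rw [join_splitDot]
        rfl
      conv_lhs => rw [h1, hrel]
      rw [resolveLoop_main d rest (splitDot [] relative_to.toList) h2 h3
        (splitDot_dotfree [] _ (by simp))]
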